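-- pv_equiv track=rewrite | github.com/cdhcsh/python-algorithm | study/17281.py | solve
-- ===== SOURCE A (Python) =====
-- from itertools import permutations
--
-- def solve(n: int, data: list[list[int]]) -> int:
--     def _cal(heat:list[int]):
--         score = 0
--         ing = 0
--         no = 5
--         while ing < n:
--             ru = 0
--             out = 3
--             while out > 0:
--                 res = data[ing][heat[no]]
--                 if res == 0:
--                     out -= 1
--                 elif res == 4:
--                     score += (ru.bit_count() + 1)
--                     ru = 0
--                 else:
--                     ru = ru * 2 ** res + 2 ** (res - 1)
--                     score += (ru // 8).bit_count()
--                     ru = ru & 7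
--                 no = (no + 1) % 9
--             ing += 1
--         return score
--
--     target = permutations(range(1, 9))
--     answer = 0
--     for t in target:
--         answer = max(answer, _cal(list(t)+[0]))
--     return answer
-- ===== SOURCE B (Python) =====
-- from itertools import permutations
--
--
-- def solve(n: int, data: list[list[int]]) -> int:
--     def play(order: list[int]) -> int:
--         total = 0
--         idx = 0
--         for inning in range(n):
--             row = data[inning]
--             hits = []
--             outs = 0
--             while outs < 3:
--                 v = row[order[idx]]
--                 idx = (idx + 1) % 9
--                 if v == 0:
--                     outs += 1
--                 else:
--                     hits.append(v)
--             # no base-state simulation: a batter who put the ball in play scores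
--             # iff his own hit plus all later advancement in the inning reaches home
--             s = 0
--             for v in reversed(hits):
--                 if v + s >= 4:
--                     total += 1
--                 s += v
--         return total
--
--     best = 0
--     for t in permutations(range(1, 9)):
--         # A starts batting at slot 5 of t + [0]; the same game, read from its
--         # first batter, is the order with player 0 batting fourth.
--         best = max(best, play(list(t[5:]) + [0] + list(t[:5])))
--     return best
-- ===== Notes on version B (the rewrite author's own statement) =====
-- stated objective: alternative
-- what changed: B never simulates base occupancy at all: per inning it first collects the list of hit values up to the third out, then scores it with a single reverse suffix-sum scan (a batter scores iff his hit value plus all subsequent advancement in the inning reaches 4), replacing A's per-at-bat bitmask state with shifts, floor-division and popcount; the batting order is also materialised once with player 0 in the fourth slot instead of cycling a rotated index from position 5.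
-- outside the precondition, e.g. on solve(1, [[-1, 0, 0, 0, 0, 0, 0, 0, 0]]): A returns 0, B returns 0
import Mathlib
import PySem

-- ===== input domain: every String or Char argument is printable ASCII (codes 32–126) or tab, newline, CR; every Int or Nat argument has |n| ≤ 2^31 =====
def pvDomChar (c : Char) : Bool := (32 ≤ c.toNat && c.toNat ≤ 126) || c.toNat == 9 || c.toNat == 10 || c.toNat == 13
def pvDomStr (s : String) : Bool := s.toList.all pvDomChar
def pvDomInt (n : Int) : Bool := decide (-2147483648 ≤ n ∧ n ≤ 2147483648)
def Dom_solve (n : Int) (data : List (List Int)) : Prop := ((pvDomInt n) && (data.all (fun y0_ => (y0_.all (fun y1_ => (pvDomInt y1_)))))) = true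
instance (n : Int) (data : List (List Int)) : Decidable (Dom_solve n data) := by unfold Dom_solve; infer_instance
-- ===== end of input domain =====

-- B removes A's per-at-bat bitmask base simulation entirely: each inning it first collects
-- the hit values up to the third out, then scores them with one reverse suffix-sum scan
-- (a batter scores iff his hit plus all later advancement in the inning reaches 4), and it
-- materialises the batting order once with player 0 fourth instead of cycling a rotated
-- index from slot 5; same brute force over permutations, same cost ("alternative").

-- ===== PORT A =====
-- the inner `while out > 0` loop of A's _cal, returning (score, no); fuel 27 always
-- suffices when the inning terminates (under Pre_ some batter of the 9-cycle makes an out)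
def solveOut (row heat : List Int) : Nat → Int → Int → Int → Int → Int × Int
  | 0, score, _, _, no => (score, no)
  | fuel+1, score, ru, out, no =>
    if out > 0 then
      let res := ((PySem.List.pyGet? row ((PySem.List.pyGet? heat no).getD 0)).getD 0)
      if res = 0 then
        solveOut row heat fuel score ru (out - 1) (PySem.Int.mod (no + 1) 9)
      else if res = 4 then
        solveOut row heat fuel (score + ((PySem.Int.bitCount ru : Int) + 1)) 0 out (PySem.Int.mod (no + 1) 9)
      else
        -- `ru * 2 ** res + 2 ** (res - 1)`: `.toNat` is exact since Pre_ gives res ≥ 0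
        -- (and this branch has res ≠ 0); on res < 0 Python raises, excluded by Pre_
        let ru2 := ru * 2 ^ res.toNat + 2 ^ (res - 1).toNat
        solveOut row heat fuel (score + (PySem.Int.bitCount (PySem.Int.floordiv ru2 8) : Int)) (PySem.Int.band ru2 7) out (PySem.Int.mod (no + 1) 9)
    else (score, no)

-- the outer `while ing < n` loop of A's _cal; fuel n.toNat is exactly the number of innings
def solveInnings (n : Int) (data : List (List Int)) (heat : List Int) : Nat → Int → Int → Int → Int
  | 0, _, score, _ => score
  | fuel+1, ing, score, no =>
    if ing < n then
      let r := solveOut ((PySem.List.pyGet? data ing).getD []) heat 27 score 0 3 no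
      solveInnings n data heat fuel (ing + 1) r.1 r.2
    else score

def solve (n : Int) (data : List (List Int)) : Int :=
  (PySem.List.permutations (PySem.List.pyRange 1 9 1) 8).foldl
    (fun answer t => max answer (solveInnings n data (t ++ [0]) n.toNat 0 0 5)) 0

-- ===== PORT B =====
-- Source B's `while outs < 3` loop collecting the inning's hit values (appending as Python
-- does) and the next batter index; fuel 27 suffices whenever the inning terminates, as in A
def altCollect (row order : List Int) : Nat → Int → Int → List Int → List Int × Int
  | 0, idx, _, hits => (hits, idx)
  | fuel+1, idx, outs, hits =>
    if outs < 3 then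
      let v := ((PySem.List.pyGet? row ((PySem.List.pyGet? order idx).getD 0)).getD 0)
      let idx' := PySem.Int.mod (idx + 1) 9
      if v = 0 then altCollect row order fuel idx' (outs + 1) hits
      else altCollect row order fuel idx' outs (hits ++ [v])
    else (hits, idx)

-- Source B's `for v in reversed(hits)` suffix-sum scan, state (s, total)
def altScore (hits : List Int) (total : Int) : Int :=
  (hits.reverse.foldl
    (fun (p : Int × Int) v => (p.1 + v, if 4 ≤ v + p.1 then p.2 + 1 else p.2))
    (0, total)).2

-- one iteration of Source B's `for inning in range(n)`, threading (total, idx)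
def altInning (data : List (List Int)) (order : List Int) (st : Int × Int) (ing : Int) : Int × Int :=
  let c := altCollect ((PySem.List.pyGet? data ing).getD []) order 27 st.2 0 []
  (altScore c.1 st.1, c.2)

-- Source B's play(order)
def altPlay (n : Int) (data : List (List Int)) (order : List Int) : Int :=
  ((PySem.List.pyRange 0 n 1).foldl (altInning data order) ((0 : Int), (0 : Int))).1

def solve_alt (n : Int) (data : List (List Int)) : Int :=
  (PySem.List.permutations (PySem.List.pyRange 1 9 1) 8).foldl
    (fun best t =>
      max best (altPlay n data
        (PySem.List.slice t (some 5) none ++ [0] ++ PySem.List.slice t none (some 5)))) 0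

-- ===== PRECONDITION & SPEC =====
-- Pre_ excludes inputs where A raises (n > len(data): IndexError; a negative value among
-- the first nine entries of a played row reached by some permutation: a float power makes
-- bit_count fail) or loops forever (a played row whose first nine entries are all nonzero:
-- the inning never ends); for uniformity it also excludes played rows carrying a negative
-- entry that no permutation ever reads, where A returns (see cites).
def Pre_solve (n : Int) (data : List (List Int)) : Prop :=
  n ≤ (data.length : Int) ∧
  ∀ row ∈ data.take n.toNat,
    9 ≤ row.length ∧ (∀ x ∈ row.take 9, 0 ≤ x) ∧ (0 : Int) ∈ row.take 9
instance (n : Int) (data : List (List Int)) : Decidable (Pre_solve n data) := by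
  unfold Pre_solve; infer_instance

def pvWitness_solve : Int × List (List Int) := (1, [[0, 0, 0, 0, 0, 0, 0, 0, 0]])

def Spec_solve (n : Int) (data : List (List Int)) (out : Int) : Prop := out = solve_alt n data
instance (n : Int) (data : List (List Int)) (out : Int) : Decidable (Spec_solve n data out) := by
  unfold Spec_solve; infer_instance

-- ===== CLAIM (what is proved, stated in full; the proofs are below) =====
def Claim_equal_solve : Prop := ∀ (n : Int) (data : List (List Int)), Dom_solve n data → Pre_solve n data → Spec_solve n data (solve n data)

-- ===== LEMMAS AND PROOFS =====

-- the proof's bookkeeping: how many runners in base mask ru are sent home by S further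
-- bases of advancement (bit b of ru = runner on base b+1, home at 4)
def countMask (ru S : Int) : Int :=
  (if PySem.Int.band ru 1 ≠ 0 ∧ 4 ≤ 1 + S then 1 else 0)
  + (if PySem.Int.band ru 2 ≠ 0 ∧ 4 ≤ 2 + S then 1 else 0)
  + (if PySem.Int.band ru 4 ≠ 0 ∧ 4 ≤ 3 + S then 1 else 0)

-- B's reverse scan, read as a foldr producing (suffix sum, runs scored)
def revPair (hits : List Int) : Int × Int :=
  hits.foldr (fun v p => (p.1 + v, if 4 ≤ v + p.1 then p.2 + 1 else p.2)) (0, 0)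

theorem revPair_fst (hits : List Int) : (revPair hits).1 = hits.sum := by
  induction hits with
  | nil => rfl
  | cons v r ih => simp [revPair, List.foldr_cons] at *; omega

theorem revPair_cons (v : Int) (r : List Int) :
    revPair (v :: r) = (r.sum + v, if 4 ≤ v + r.sum then (revPair r).2 + 1 else (revPair r).2) := by
  show ((revPair r).1 + v, if 4 ≤ v + (revPair r).1 then (revPair r).2 + 1 else (revPair r).2) = _
  rw [revPair_fst]

theorem revPair_shift (hits : List Int) (t : Int) :
    hits.foldr (fun v (p : Int × Int) => (p.1 + v, if 4 ≤ v + p.1 then p.2 + 1 else p.2)) (0, t)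
      = ((revPair hits).1, t + (revPair hits).2) := by
  induction hits with
  | nil => simp [revPair]
  | cons v r ih =>
    simp only [revPair, List.foldr_cons] at *
    rw [ih, Prod.mk.injEq]
    refine ⟨rfl, ?_⟩
    split_ifs <;> omega

theorem altScore_eq (hits : List Int) (total : Int) :
    altScore hits total = total + (revPair hits).2 := by
  unfold altScore
  rw [List.foldl_reverse, revPair_shift]

-- appending accumulator of B's collect loop factored out
theorem altCollect_acc (row order : List Int) :
    ∀ (fuel : Nat) (idx outs : Int) (hits : List Int),
    altCollect row order fuel idx outs hits
      = (hits ++ (altCollect row order fuel idx outs []).1,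
         (altCollect row order fuel idx outs []).2) := by
  intro fuel
  induction fuel with
  | zero => intro idx outs hits; simp [altCollect]
  | succ fuel ih =>
    intro idx outs hits
    simp only [altCollect]
    by_cases h3 : outs < 3
    · simp only [if_pos h3]
      by_cases hv : ((PySem.List.pyGet? row ((PySem.List.pyGet? order idx).getD 0)).getD 0) = 0
      · simp only [if_pos hv]
        exact ih _ _ hits
      · simp only [if_neg hv]
        rw [ih _ _ (hits ++ [_]), ih _ _ ([] ++ [_])]
        simp
    · simp [if_neg h3]

theorem countMask_clamp (ru S : Int) (h : 3 ≤ S) : countMask ru S = countMask ru 3 := by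
  simp only [countMask,
    show (4 ≤ 1 + S) = (4 ≤ (1:Int) + 3) from propext (by omega),
    show (4 ≤ 2 + S) = (4 ≤ (2:Int) + 3) from propext (by omega),
    show (4 ≤ 3 + S) = (4 ≤ (3:Int) + 3) from propext (by omega)]

theorem countMask_zero (S : Int) : countMask 0 S = 0 := by
  simp only [countMask,
    show PySem.Int.band 0 1 = 0 from by decide,
    show PySem.Int.band 0 2 = 0 from by decide,
    show PySem.Int.band 0 4 = 0 from by decide]
  simp

theorem countMask_sum0 (ru : Int) : countMask ru 0 = 0 := by
  simp only [countMask]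
  norm_num

theorem countMask_full (ru : Int) (h0 : 0 ≤ ru) (h7 : ru ≤ 7) :
    countMask ru 3 = (PySem.Int.bitCount ru : Int) := by
  interval_cases ru <;> decide

theorem bitCount_two_mul {x : Int} (hx : 0 < x) :
    PySem.Int.bitCount (2 * x) = PySem.Int.bitCount x := by
  rw [PySem.Int.bitCount_of_pos (by omega)]
  have h1 : PySem.Int.mod (2 * x) 2 = 0 := (PySem.Int.mod_eq_zero_iff_dvd _ _).2 ⟨x, rfl⟩
  have h2 : PySem.Int.floordiv (2 * x) 2 = x := by
    rw [PySem.Int.floordiv_eq_ediv_of_pos (by omega)]; omega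
  rw [h1, h2]; simp

theorem bitCount_two_pow_mul (k : Nat) {m : Int} (hm : 0 < m) :
    PySem.Int.bitCount (2 ^ k * m) = PySem.Int.bitCount m := by
  induction k with
  | zero => simp
  | succ k ih =>
    have : (2 : Int) ^ (k + 1) * m = 2 * (2 ^ k * m) := by ring
    rw [this, bitCount_two_mul (by positivity), ih]

theorem band8 {y : Int} (hy : 0 ≤ y) : PySem.Int.band (8 * y) 7 = 0 := by
  rw [PySem.Int.band_of_nonneg (by omega) (by omega)]
  have h8 : (8 * y).toNat = 8 * y.toNat := by omega
  rw [h8]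
  have h : (7 : Int).toNat = 2 ^ 3 - 1 := by decide
  rw [h, Nat.and_two_pow_sub_one_eq_mod]
  omega

-- one hit of value 1..3: A's shift-and-popcount bookkeeping versus the suffix-sum rule
theorem step123 (v ru S : Int) (h1 : 1 ≤ v) (h3 : v ≤ 3) (hr0 : 0 ≤ ru) (hr7 : ru ≤ 7) (hS : 0 ≤ S) :
    ((PySem.Int.bitCount (PySem.Int.floordiv (ru * 2 ^ v.toNat + 2 ^ (v - 1).toNat) 8) : Int)
        + countMask (PySem.Int.band (ru * 2 ^ v.toNat + 2 ^ (v - 1).toNat) 7) S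
      = countMask ru (v + S) + (if 4 ≤ v + S then 1 else 0))
    ∧ 0 ≤ PySem.Int.band (ru * 2 ^ v.toNat + 2 ^ (v - 1).toNat) 7
    ∧ PySem.Int.band (ru * 2 ^ v.toNat + 2 ^ (v - 1).toNat) 7 ≤ 7 := by
  by_cases hS3 : 3 ≤ S
  · rw [countMask_clamp _ S hS3, countMask_clamp _ (v + S) (by omega), if_pos (by omega)]
    interval_cases v <;> interval_cases ru <;> exact ⟨by decide, by decide, by decide⟩
  · have hS2 : S ≤ 2 := by omega
    interval_cases S <;> interval_cases v <;> interval_cases ru <;>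
      exact ⟨by decide, by decide, by decide⟩

-- a homerun (value 4): everyone on base and the batter score
theorem step4 (ru S : Int) (hr0 : 0 ≤ ru) (hr7 : ru ≤ 7) (hS : 0 ≤ S) :
    (PySem.Int.bitCount ru : Int) + 1 = countMask ru (4 + S) + (if 4 ≤ 4 + S then 1 else 0) := by
  rw [countMask_clamp _ _ (by omega), countMask_full ru hr0 hr7, if_pos (by omega)]

-- a hit of value ≥ 5 takes A's else branch; everyone still scores and the mask clears
theorem step5 (v ru S : Int) (h5 : 5 ≤ v) (hr0 : 0 ≤ ru) (hr7 : ru ≤ 7) (hS : 0 ≤ S) :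
    ((PySem.Int.bitCount (PySem.Int.floordiv (ru * 2 ^ v.toNat + 2 ^ (v - 1).toNat) 8) : Int)
        + countMask (PySem.Int.band (ru * 2 ^ v.toNat + 2 ^ (v - 1).toNat) 7) S
      = countMask ru (v + S) + (if 4 ≤ v + S then 1 else 0))
    ∧ PySem.Int.band (ru * 2 ^ v.toNat + 2 ^ (v - 1).toNat) 7 = 0 := by
  obtain ⟨k, hkv⟩ : ∃ k : Nat, v = (k : Int) + 5 := ⟨(v - 5).toNat, by omega⟩
  have htn1 : v.toNat = k + 5 := by omega
  have htn2 : (v - 1).toNat = k + 4 := by omega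
  have hru2 : ru * 2 ^ v.toNat + 2 ^ (v - 1).toNat
      = 8 * (2 ^ (k + 1) * (2 * ru + 1)) := by
    rw [htn1, htn2]; ring
  have hband : PySem.Int.band (ru * 2 ^ v.toNat + 2 ^ (v - 1).toNat) 7 = 0 := by
    rw [hru2]; exact band8 (by positivity)
  refine ⟨?_, hband⟩
  have hfd : PySem.Int.floordiv (8 * (2 ^ (k + 1) * (2 * ru + 1))) 8
      = 2 ^ (k + 1) * (2 * ru + 1) := by
    rw [PySem.Int.floordiv_eq_ediv_of_pos (by norm_num)]
    exact Int.mul_ediv_cancel_left _ (by norm_num)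
  have hodd : PySem.Int.bitCount (2 * ru + 1) = PySem.Int.bitCount ru + 1 := by
    interval_cases ru <;> decide
  rw [hband, countMask_zero, hru2, hfd, bitCount_two_pow_mul (k + 1) (by omega), hodd,
    countMask_clamp _ (v + S) (by omega), countMask_full ru hr0 hr7, if_pos (by omega)]
  push_cast
  ring

theorem list_len8 {α : Type} {l : List α} (h : l.length = 8) :
    ∃ a1 a2 a3 a4 a5 a6 a7 a8, l = [a1, a2, a3, a4, a5, a6, a7, a8] := by
  match l, h with
  | [a1, a2, a3, a4, a5, a6, a7, a8], _ => exact ⟨_, _, _, _, _, _, _, _, rfl⟩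

-- one inning: A's (bitmask, countdown, rotated index) state is simulated by B's
-- (collected hits, countup, shifted index) state, for any common fuel; the suffix-sum
-- identity: A's score gain = runners countMask sends home + B's reverse-scan count
theorem inner_sim (row heat order : List Int)
    (hrow9 : 9 ≤ row.length)
    (hpos : ∀ x ∈ row.take 9, 0 ≤ x)
    (hv : ∀ m : Int, 0 ≤ m → m < 9 →
      0 ≤ (PySem.List.pyGet? heat m).getD 0 ∧ (PySem.List.pyGet? heat m).getD 0 < 9)
    (hrel : ∀ m : Int, 0 ≤ m → m < 9 →
      (PySem.List.pyGet? order (PySem.Int.mod (m + 4) 9)).getD 0 = (PySem.List.pyGet? heat m).getD 0) :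
    ∀ (fuel : Nat) (score out no ru : Int), 0 ≤ no → no < 9 → 0 ≤ ru → ru ≤ 7 →
    ((solveOut row heat fuel score ru out no).1
      = score + countMask ru (altCollect row order fuel (PySem.Int.mod (no + 4) 9) (3 - out) []).1.sum
        + (revPair (altCollect row order fuel (PySem.Int.mod (no + 4) 9) (3 - out) []).1).2)
    ∧ (altCollect row order fuel (PySem.Int.mod (no + 4) 9) (3 - out) []).2
      = PySem.Int.mod ((solveOut row heat fuel score ru out no).2 + 4) 9
    ∧ 0 ≤ (solveOut row heat fuel score ru out no).2
    ∧ (solveOut row heat fuel score ru out no).2 < 9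
    ∧ 0 ≤ (altCollect row order fuel (PySem.Int.mod (no + 4) 9) (3 - out) []).1.sum := by
  intro fuel
  induction fuel with
  | zero =>
    intro score out no ru h0 h9 hr0 hr7
    refine ⟨?_, rfl, h0, h9, le_refl 0⟩
    simp [solveOut, altCollect, countMask_sum0, revPair]
  | succ fuel ih =>
    intro score out no ru h0 h9 hr0 hr7
    by_cases hout : out > 0
    · have houts : (3 : Int) - out < 3 := by omega
      have hjb := hv no h0 h9
      have hresnn : 0 ≤ (PySem.List.pyGet? row ((PySem.List.pyGet? heat no).getD 0)).getD 0 := by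
        set j := (PySem.List.pyGet? heat no).getD 0 with hj
        have hjlt : j < (row.length : Int) := by omega
        rw [PySem.List.pyGet?_eq_some_getElem row hjb.1 hjlt]
        simp only [Option.getD_some]
        have hlt : j.toNat < (row.take 9).length := by simp [List.length_take]; omega
        have hmem : (row.take 9)[j.toNat] ∈ row.take 9 := List.getElem_mem hlt
        have heq : (row.take 9)[j.toNat] = row[j.toNat]'(by omega) := List.getElem_take
        rw [heq] at hmem
        exact hpos _ hmem
      have hno'0 : 0 ≤ PySem.Int.mod (no + 1) 9 := PySem.Int.mod_nonneg _ (by norm_num)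
      have hno'9 : PySem.Int.mod (no + 1) 9 < 9 := PySem.Int.mod_lt _ (by norm_num)
      have hidx : PySem.Int.mod (PySem.Int.mod (no + 4) 9 + 1) 9
          = PySem.Int.mod (PySem.Int.mod (no + 1) 9 + 4) 9 := by
        rw [PySem.Int.mod_eq_emod_of_pos (by norm_num), PySem.Int.mod_eq_emod_of_pos (by norm_num),
          PySem.Int.mod_eq_emod_of_pos (by norm_num), PySem.Int.mod_eq_emod_of_pos (by norm_num)]
        omega
      simp only [solveOut, altCollect, if_pos hout, if_pos houts, hrel no h0 h9]
      set res := (PySem.List.pyGet? row ((PySem.List.pyGet? heat no).getD 0)).getD 0 with hres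
      rw [hidx]
      by_cases h0' : res = 0
      · simp only [if_pos h0']
        have h := ih score (out - 1) (PySem.Int.mod (no + 1) 9) ru hno'0 hno'9 hr0 hr7
        rw [show (3 : Int) - (out - 1) = 3 - out + 1 from by ring] at h
        exact h
      · rw [altCollect_acc row order fuel _ _ ([] ++ [res])]
        set T := (altCollect row order fuel (PySem.Int.mod (PySem.Int.mod (no + 1) 9 + 4) 9) (3 - out) []).1 with hT
        by_cases h4 : res = 4
        · simp only [if_neg h0', if_pos h4]
          obtain ⟨e1, e2, e3, e4, e5⟩ :=
            ih (score + ((PySem.Int.bitCount ru : Int) + 1)) out (PySem.Int.mod (no + 1) 9) 0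
              hno'0 hno'9 (by norm_num) (by norm_num)
          rw [← hT] at e1 e5
          have hsum : (([] ++ [res]) ++ T).sum = res + T.sum := by simp
          have hs4 := step4 ru T.sum hr0 hr7 e5
          rw [if_pos (by omega : (4:Int) ≤ 4 + T.sum)] at hs4
          refine ⟨?_, e2, e3, e4, by rw [hsum]; omega⟩
          rw [e1, hsum, show ([] ++ [res]) ++ T = res :: T from by simp, revPair_cons,
            countMask_zero, h4, if_pos (by omega : (4:Int) ≤ 4 + T.sum)]
          omega
        · simp only [if_neg h0', if_neg h4]
          have hres1 : 1 ≤ res := by omega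
          have key : ((PySem.Int.bitCount (PySem.Int.floordiv (ru * 2 ^ res.toNat + 2 ^ (res - 1).toNat) 8) : Int)
                + countMask (PySem.Int.band (ru * 2 ^ res.toNat + 2 ^ (res - 1).toNat) 7) T.sum
              = countMask ru (res + T.sum) + (if 4 ≤ res + T.sum then 1 else 0))
              ∧ 0 ≤ PySem.Int.band (ru * 2 ^ res.toNat + 2 ^ (res - 1).toNat) 7
              ∧ PySem.Int.band (ru * 2 ^ res.toNat + 2 ^ (res - 1).toNat) 7 ≤ 7 := by
            have e5' : 0 ≤ T.sum := by
              obtain ⟨_, _, _, _, e5⟩ :=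
                ih score out (PySem.Int.mod (no + 1) 9) ru hno'0 hno'9 hr0 hr7
              rw [← hT] at e5
              exact e5
            by_cases hle : res ≤ 3
            · exact step123 res ru T.sum hres1 hle hr0 hr7 e5'
            · obtain ⟨a, b⟩ := step5 res ru T.sum (by omega) hr0 hr7 e5'
              exact ⟨a, by rw [b], by rw [b]; norm_num⟩
          obtain ⟨e1, e2, e3, e4, e5⟩ :=
            ih (score + (PySem.Int.bitCount (PySem.Int.floordiv (ru * 2 ^ res.toNat + 2 ^ (res - 1).toNat) 8) : Int))
              out (PySem.Int.mod (no + 1) 9)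
              (PySem.Int.band (ru * 2 ^ res.toNat + 2 ^ (res - 1).toNat) 7)
              hno'0 hno'9 key.2.1 key.2.2
          rw [← hT] at e1 e5
          have hsum : (([] ++ [res]) ++ T).sum = res + T.sum := by simp
          refine ⟨?_, e2, e3, e4, by rw [hsum]; omega⟩
          rw [e1, hsum, show ([] ++ [res]) ++ T = res :: T from by simp, revPair_cons]
          have hk := key.1
          split_ifs with hc <;> split_ifs at hk <;> omega
    · have houts : ¬((3 : Int) - out < 3) := by omega
      simp only [solveOut, altCollect, if_neg hout, if_neg houts]
      refine ⟨?_, ?_, h0, h9, le_refl 0⟩ <;> simp [countMask_sum0, revPair]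

-- t ++ [0] holds only player numbers 0..8
theorem heat_vals (t : List Int) (ht : t.length = 8) (hm : ∀ x ∈ t, 1 ≤ x ∧ x < 9) :
    ∀ m : Int, 0 ≤ m → m < 9 →
      0 ≤ (PySem.List.pyGet? (t ++ [0]) m).getD 0 ∧ (PySem.List.pyGet? (t ++ [0]) m).getD 0 < 9 := by
  intro m h0 h9
  have hlen : ((t ++ [0]).length : Int) = 9 := by simp [ht]
  rw [PySem.List.pyGet?_eq_some_getElem _ h0 (by omega)]
  simp only [Option.getD_some]
  have hmem : (t ++ [0])[m.toNat]'(by omega) ∈ t ++ [0] := List.getElem_mem _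
  rcases List.mem_append.1 hmem with h | h
  · have := hm _ h; omega
  · simp only [List.mem_singleton] at h; omega

-- B's materialised order is A's lineup read from batting position 5
theorem heat_rel (t : List Int) (ht : t.length = 8) :
    ∀ m : Int, 0 ≤ m → m < 9 →
      (PySem.List.pyGet? (t.drop 5 ++ [0] ++ t.take 5) (PySem.Int.mod (m + 4) 9)).getD 0
        = (PySem.List.pyGet? (t ++ [0]) m).getD 0 := by
  obtain ⟨a1, a2, a3, a4, a5, a6, a7, a8, rfl⟩ := list_len8 ht
  intro m h0 h9
  interval_cases m <;>
    simp [PySem.List.pyGet?, PySem.List.pyIdx?, PySem.Int.mod]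

-- the whole game: A's inning countdown equals B's fold over range(n)
theorem innings_sim (n : Int) (data : List (List Int)) (heat order : List Int)
    (hpre : Pre_solve n data)
    (hv : ∀ m : Int, 0 ≤ m → m < 9 →
      0 ≤ (PySem.List.pyGet? heat m).getD 0 ∧ (PySem.List.pyGet? heat m).getD 0 < 9)
    (hrel : ∀ m : Int, 0 ≤ m → m < 9 →
      (PySem.List.pyGet? order (PySem.Int.mod (m + 4) 9)).getD 0 = (PySem.List.pyGet? heat m).getD 0) :
    ∀ (fuel : Nat) (ing score no : Int), 0 ≤ ing → (n - ing).toNat = fuel → 0 ≤ no → no < 9 →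
    solveInnings n data heat fuel ing score no
      = ((PySem.List.pyRange ing n 1).foldl (altInning data order)
          (score, PySem.Int.mod (no + 4) 9)).1 := by
  intro fuel
  induction fuel with
  | zero =>
    intro ing score no h0 hfuel hn0 hn9
    rw [PySem.List.pyRange_one_eq_nil (by omega)]
    rfl
  | succ fuel ih =>
    intro ing score no h0 hfuel hn0 hn9
    have hing : ing < n := by omega
    have hlen : n ≤ (data.length : Int) := hpre.1
    rw [PySem.List.pyRange_one_cons hing]
    simp only [List.foldl_cons, solveInnings, if_pos hing]
    have hget : PySem.List.pyGet? data ing = some (data[ing.toNat]'(by omega)) :=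
      PySem.List.pyGet?_eq_some_getElem data h0 (by omega)
    set row := (PySem.List.pyGet? data ing).getD [] with hrowdef
    have hrowmem : row ∈ data.take n.toNat := by
      rw [hrowdef, hget]
      simp only [Option.getD_some]
      have hlt : ing.toNat < (data.take n.toNat).length := by rw [List.length_take]; omega
      have hmem : (data.take n.toNat)[ing.toNat] ∈ data.take n.toNat := List.getElem_mem hlt
      have heq : (data.take n.toNat)[ing.toNat] = data[ing.toNat]'(by omega) := List.getElem_take
      rw [heq] at hmem
      exact hmem
    obtain ⟨hrow9, hrowpos, _⟩ := hpre.2 row hrowmem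
    obtain ⟨e1, e2, e3, e4, _⟩ :=
      inner_sim row heat order hrow9 hrowpos hv hrel 27 score 3 no 0 hn0 hn9 (by norm_num) (by norm_num)
    have hpair :
        altInning data order (score, PySem.Int.mod (no + 4) 9) ing
        = ((solveOut row heat 27 score 0 3 no).1,
           PySem.Int.mod ((solveOut row heat 27 score 0 3 no).2 + 4) 9) := by
      simp only [altInning, ← hrowdef]
      rw [show (3 : Int) - 3 = 0 from by norm_num] at e1 e2
      rw [Prod.mk.injEq]
      refine ⟨?_, e2⟩
      rw [altScore_eq, e1, countMask_zero]
      omega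
    rw [hpair]
    exact ih (ing + 1) _ _ (by omega) (by omega) e3 e4

-- one permutation: A's _cal from batting slot 5 equals B's play of the materialised order
theorem perm_game (n : Int) (data : List (List Int)) (hpre : Pre_solve n data)
    (t : List Int) (ht : t.length = 8) (hm : ∀ x ∈ t, 1 ≤ x ∧ x < 9) :
    solveInnings n data (t ++ [0]) n.toNat 0 0 5
      = altPlay n data
          (PySem.List.slice t (some 5) none ++ [0] ++ PySem.List.slice t none (some 5)) := by
  rw [PySem.List.slice_from t (show (0:Int) ≤ 5 by norm_num), PySem.List.slice_to (xs := t) (b := 5) (by norm_num)]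
  unfold altPlay
  have h := innings_sim n data (t ++ [0]) ((t.drop (5:Int).toNat) ++ [0] ++ (t.take (5:Int).toNat))
    hpre (heat_vals t ht hm)
    (by simpa using heat_rel t ht)
    n.toNat 0 0 5 le_rfl (by omega) (by norm_num) (by norm_num)
  simpa [show PySem.Int.mod (5 + 4) 9 = 0 from by decide] using h

-- ===== VERDICT (by name: the statement is the Claim_ definition above) =====
theorem solve_spec : Claim_equal_solve := by
  unfold Claim_equal_solve Spec_solve
  intro n data _hdom hpre
  unfold solve solve_alt
  apply PySem.List.foldl_congr_mem
  intro acc t htmem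
  have h8 : (PySem.List.pyRange 1 9 1).length = 8 := by decide
  have hperm : t.Perm (PySem.List.pyRange 1 9 1) := by
    apply PySem.List.perm_of_mem_permutations
    rw [h8]
    exact htmem
  have ht : t.length = 8 := by rw [hperm.length_eq, h8]
  have hm : ∀ x ∈ t, 1 ≤ x ∧ x < 9 := by
    intro x hx
    have : x ∈ PySem.List.pyRange 1 9 1 := hperm.subset hx
    exact (PySem.List.mem_pyRange_one).1 this
  rw [perm_game n data hpre t ht hm]
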